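-- pv_equiv track=rewrite | github.com/LuanBog/unbored-game | games.py | change_letter
-- ===== SOURCE A (Python) =====
-- def change_letter(word, letter, position):
--     word = word.strip().split()
--
--     result = ''
--
--     for index, lett in enumerate(word):
--         if lett == '_':
--             if index == position:
--                 result = result + letter + ' '
--             else:
--                 result = result + '_ '
--         else:
--             result = result + lett + ' '
--
--     return result.strip()
-- ===== SOURCE B (Python) =====
-- def change_letter(word, letter, position):
--     tokens = word.strip().split()
--     if 0 <= position < len(tokens) and tokens[position] == '_':
--         tokens[position] = letter
--     return ' '.join(tokens).strip()
-- ===== Notes on version B (the rewrite author's own statement) =====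
-- stated objective: simpler
-- what changed: B replaces A's rebuild-every-token loop (enumerate + three-way branch appending each token plus a space, then strip) with a single guarded in-place assignment tokens[position] = letter followed by ' '.join; the final strip keeps A's behaviour when letter itself carries boundary whitespace.
import Mathlib
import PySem

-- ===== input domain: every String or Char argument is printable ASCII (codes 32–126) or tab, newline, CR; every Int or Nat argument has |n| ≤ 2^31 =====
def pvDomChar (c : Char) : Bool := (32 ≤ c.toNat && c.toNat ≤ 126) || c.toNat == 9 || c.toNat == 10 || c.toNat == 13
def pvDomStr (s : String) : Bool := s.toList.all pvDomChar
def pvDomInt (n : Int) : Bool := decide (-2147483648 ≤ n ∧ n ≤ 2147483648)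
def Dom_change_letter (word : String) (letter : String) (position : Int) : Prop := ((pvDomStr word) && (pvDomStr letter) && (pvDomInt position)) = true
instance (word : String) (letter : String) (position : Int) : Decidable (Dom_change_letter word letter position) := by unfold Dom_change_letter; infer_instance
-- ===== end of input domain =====

-- B replaces A's rebuild-every-token loop with one guarded in-place replacement followed by a join (objective: simpler).

-- ===== PORT A =====
def change_letter (word : String) (letter : String) (position : Int) : String :=
  let toks := PySem.Str.split₀ (PySem.Str.strip word)
  let result := (PySem.List.enumerate toks).foldl
    (fun r p =>
      if p.2 = "_" then
        (if p.1 = position then r ++ letter ++ " " else r ++ "_ ")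
      else r ++ p.2 ++ " ") ""
  PySem.Str.strip result

-- ===== PORT B =====
def change_letter_alt (word : String) (letter : String) (position : Int) : String :=
  let toks := PySem.Str.split₀ (PySem.Str.strip word)
  let toks' :=
    if 0 ≤ position ∧ position < toks.length ∧ toks[position.toNat]? = some "_" then
      toks.set position.toNat letter
    else toks
  PySem.Str.strip (PySem.Str.join " " toks')

-- ===== PRECONDITION & SPEC =====
def Spec_change_letter (word : String) (letter : String) (position : Int) (out : String) : Prop := out = change_letter_alt word letter position
instance (word : String) (letter : String) (position : Int) (out : String) : Decidable (Spec_change_letter word letter position out) := by unfold Spec_change_letter; infer_instance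

-- ===== CLAIM (what is proved, stated in full; the proofs are below) =====
def Claim_equal_change_letter : Prop := ∀ (word : String) (letter : String) (position : Int), Dom_change_letter word letter position → Spec_change_letter word letter position (change_letter word letter position)

-- ===== LEMMAS AND PROOFS =====

-- the per-token output of A's loop body: the (possibly replaced) token plus one space
def pvOut (letter : String) (position : Int) (p : Int × String) : String :=
  (if p.2 = "_" ∧ p.1 = position then letter else p.2) ++ " "

lemma pv_foldl_toList (letter : String) (position : Int) (l : List (Int × String)) (a : String) :
    (l.foldl (fun r p =>
      if p.2 = "_" then
        (if p.1 = position then r ++ letter ++ " " else r ++ "_ ")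
      else r ++ p.2 ++ " ") a).toList
    = a.toList ++ (l.map (fun p => (pvOut letter position p).toList)).flatten := by
  induction l generalizing a with
  | nil => simp
  | cons h t ih =>
      simp only [List.foldl_cons, List.map_cons, List.flatten_cons, ih]
      by_cases h1 : h.2 = "_" <;> by_cases h2 : h.1 = position <;>
        simp [pvOut, h1, h2]

lemma pv_flatten_eq_join (ts : List String) :
    (ts.map (fun t => t.toList ++ [' '])).flatten
      = (if ts = [] then ([] : List Char)
         else PySem.Chars.join [' '] (ts.map String.toList) ++ [' ']) := by
  induction ts with
  | nil => simp
  | cons h t ih =>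
      cases t with
      | nil => simp [PySem.Chars.join, List.intercalate]
      | cons b u =>
          rw [List.map_cons, List.flatten_cons, ih, if_neg (by simp), if_neg (by simp)]
          simp only [List.map_cons]
          rw [PySem.Chars.join_cons_cons]
          simp [List.append_assoc]

lemma pv_strip_append_space (s : List Char) :
    PySem.Chars.strip (s ++ [' ']) = PySem.Chars.strip s := by
  have hsp : PySem.Chars.isspace ' ' = true := by decide
  have hr : ∀ (x : List Char), PySem.Chars.rstrip (x ++ [' ']) = PySem.Chars.rstrip x := by
    intro x
    simp [PySem.Chars.rstrip, hsp]
  simp only [PySem.Chars.strip, PySem.Chars.lstrip, List.dropWhile_append]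
  split
  · rename_i hemp
    rw [List.isEmpty_iff] at hemp
    simp [List.dropWhile, hsp, hemp]
  · exact hr _

lemma pv_map_enum_eq_set (toks : List String) (letter : String) (position : Int) :
    (PySem.List.enumerate toks).map (fun p => if p.2 = "_" ∧ p.1 = position then letter else p.2)
      = (if 0 ≤ position ∧ position < toks.length ∧ toks[position.toNat]? = some "_" then
          toks.set position.toNat letter
        else toks) := by
  split
  · rename_i hc
    obtain ⟨h0, hlt, hget⟩ := hc
    have hn : position.toNat < toks.length := by omega
    apply List.ext_getElem
    · simp [PySem.List.length_enumerate]
    · intro k hk hk'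
      simp only [List.getElem_map, PySem.List.getElem_enumerate, List.getElem_set]
      have hgk : toks[position.toNat] = "_" := by
        have := List.getElem?_eq_getElem (l := toks) (i := position.toNat) hn
        rw [hget] at this; exact (Option.some_injective _ this.symm)
      by_cases hkp : (0 : Int) + k = position
      · have hnk : position.toNat = k := by omega
        have hgk' : toks[k]'(by omega) = "_" := by
          have : toks[position.toNat]'hn = toks[k]'(by omega) := by congr 1
          rw [← this]; exact hgk
        simp [hgk', hkp, hnk]
      · have hne : ¬ position.toNat = k := by omega
        simp only [List.getElem_set, if_neg hne]
        exact if_neg (fun h => hkp h.2)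
  · rename_i hc
    push_neg at hc
    apply List.ext_getElem
    · simp [PySem.List.length_enumerate]
    · intro k hk hk'
      simp only [List.getElem_map, PySem.List.getElem_enumerate]
      by_cases hkp : (0 : Int) + k = position
      · have h0 : 0 ≤ position := by omega
        have hlt : position < toks.length := by
          have : k < toks.length := by simpa using hk'
          omega
        have hnk : position.toNat = k := by omega
        have hne : toks[position.toNat]? ≠ some "_" := hc h0 hlt
        rw [List.getElem?_eq_getElem (by omega)] at hne
        have hgne : ¬ toks[k]'(by omega) = "_" := by
          intro h
          apply hne
          have : toks[position.toNat]'(by omega) = toks[k]'(by omega) := by congr 1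
          rw [this, h]
        exact if_neg (fun h => hgne h.1)
      · exact if_neg (fun h => hkp h.2)

lemma pv_strip_concat_eq_strip_join (ts : List String) :
    PySem.Chars.strip ((ts.map (fun t => t.toList ++ [' '])).flatten)
      = PySem.Chars.strip ((PySem.Str.join " " ts).toList) := by
  rw [PySem.Str.toList_join, pv_flatten_eq_join]
  have hsep : (" " : String).toList = [' '] := rfl
  split
  · rename_i h
    simp [h, PySem.Chars.join, List.intercalate]
  · rw [hsep, pv_strip_append_space]

-- ===== VERDICT (by name: the statement is the Claim_ definition above) =====
theorem change_letter_spec : Claim_equal_change_letter := by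
  intro word letter position _
  show change_letter word letter position = change_letter_alt word letter position
  unfold change_letter change_letter_alt
  rw [← String.toList_inj]
  simp only [pv_foldl_toList, PySem.Str.toList_strip]
  have hmap : ∀ (l : List (Int × String)),
      l.map (fun p => (pvOut letter position p).toList)
        = (l.map (fun p => if p.2 = "_" ∧ p.1 = position then letter else p.2)).map
            (fun t => t.toList ++ [' ']) := by
    intro l
    rw [List.map_map]
    apply List.map_congr_left
    intro p _
    simp [pvOut]
  rw [hmap, pv_map_enum_eq_set, show ("" : String).toList = [] from rfl, List.nil_append,
    pv_strip_concat_eq_strip_join]
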